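-- pv_equiv track=rewrite | github.com/hguilloteau/python | exercice_9.4.py | triplement_espace
-- ===== SOURCE A (Python) =====
-- def triplement_espace(phrase):
--     "fonction qui triple tous les espaces d'une phrase"
--     phrase_new = ''
--     i = 0
--     while i < len(phrase):
--         if phrase[i] == ' ':
--             phrase_new = phrase_new + '   '
--         else:
--             phrase_new = phrase_new + phrase[i]
--         i = i + 1
--     return phrase_new
-- ===== SOURCE B (Python) =====
-- def triplement_espace(phrase):
--     "fonction qui triple tous les espaces d'une phrase"
--     return '   '.join(phrase.split(' '))
-- ===== Notes on version B (the rewrite author's own statement) =====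
-- stated objective: faster
-- what changed: Replaces the index-driven character loop with quadratic repeated string concatenation by a single split-on-space into a list of segments joined back with a triple space.
import Mathlib
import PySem

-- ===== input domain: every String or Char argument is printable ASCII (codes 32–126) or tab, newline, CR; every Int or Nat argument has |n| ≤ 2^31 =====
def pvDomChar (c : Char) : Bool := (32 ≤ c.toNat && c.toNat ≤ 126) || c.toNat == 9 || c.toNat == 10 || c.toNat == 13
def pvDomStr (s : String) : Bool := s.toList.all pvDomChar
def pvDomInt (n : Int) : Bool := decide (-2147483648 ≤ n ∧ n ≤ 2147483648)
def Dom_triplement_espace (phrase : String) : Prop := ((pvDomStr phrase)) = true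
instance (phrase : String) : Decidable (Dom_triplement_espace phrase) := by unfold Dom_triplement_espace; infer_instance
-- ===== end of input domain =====

-- B replaces A's index-driven character loop (repeated string concatenation) by the
-- idiomatic split-on-space / join-with-triple-space pair; return values proved equal on Dom.

-- ===== PORT A =====
-- A's while loop over indices, accumulating phrase_new; ported as the structural
-- recursion over the remaining characters carrying the accumulator (same state,
-- same branch order: append '   ' on a space, else append the character).
def triplement_espace_go : List Char → List Char → List Char
  | acc, [] => acc
  | acc, c :: rest =>
      if c = ' ' then triplement_espace_go (acc ++ [' ', ' ', ' ']) rest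
      else triplement_espace_go (acc ++ [c]) rest

def triplement_espace (phrase : String) : String :=
  String.ofList (triplement_espace_go [] phrase.toList)

-- ===== PORT B =====
-- B is "'   '.join(phrase.split(' '))"; sep ' ' is nonempty so Python's split never
-- raises: ported exactly via PySem.Chars.splitOn (the sep ≠ "" form of str.split)
-- and PySem.Chars.join.
def triplement_espace_alt (phrase : String) : String :=
  String.ofList (PySem.Chars.join [' ', ' ', ' ']
    (PySem.Chars.splitOn phrase.toList [' ']))

-- ===== PRECONDITION & SPEC =====
def Spec_triplement_espace (phrase : String) (out : String) : Prop := out = triplement_espace_alt phrase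
instance (phrase : String) (out : String) : Decidable (Spec_triplement_espace phrase out) := by unfold Spec_triplement_espace; infer_instance

-- ===== CLAIM (what is proved, stated in full; the proofs are below) =====
def Claim_equal_triplement_espace : Prop := ∀ (phrase : String), Dom_triplement_espace phrase → Spec_triplement_espace phrase (triplement_espace phrase)

-- ===== LEMMAS AND PROOFS =====

-- the common value both sides compute: each char mapped, spaces tripled
def pvTriple (c : Char) : List Char := if c = ' ' then [' ', ' ', ' '] else [c]

theorem triplement_espace_go_eq (l acc : List Char) :
    triplement_espace_go acc l = acc ++ l.flatMap pvTriple := by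
  induction l generalizing acc with
  | nil => simp [triplement_espace_go]
  | cons c rest ih =>
      by_cases h : c = ' ' <;>
        simp [triplement_espace_go, h, ih, pvTriple, List.append_assoc]

-- the segment list splitOn.go produces, written as a simple recursion
def pvSegs : List Char → List Char → List (List Char)
  | pre, [] => [pre]
  | pre, c :: rest =>
      if c = ' ' then pre :: pvSegs [] rest
      else pvSegs (pre ++ [c]) rest

theorem splitOn_go_eq (fuel : Nat) (l cur : List Char) (acc : List (List Char)) (h : l.length < fuel) :
    PySem.Chars.splitOn.go [' '] fuel l cur acc =
      acc.reverse ++ pvSegs cur.reverse l := by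
  induction fuel generalizing l cur acc with
  | zero => omega
  | succ fuel ih =>
      cases l with
      | nil => simp [PySem.Chars.splitOn.go, pvSegs]

      | cons c rest =>
          by_cases hc : c = ' '
          · subst hc
            rw [show PySem.Chars.splitOn.go [' '] (fuel + 1) (' ' :: rest) cur acc
                  = PySem.Chars.splitOn.go [' '] fuel rest [] (cur.reverse :: acc) by
                simp [PySem.Chars.splitOn.go, List.isPrefixOf]]
            rw [ih rest [] (cur.reverse :: acc) (by simpa using Nat.lt_of_succ_lt_succ h)]
            simp [pvSegs]
          · rw [show PySem.Chars.splitOn.go [' '] (fuel + 1) (c :: rest) cur acc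
                  = PySem.Chars.splitOn.go [' '] fuel rest (c :: cur) acc by
                simp [PySem.Chars.splitOn.go, List.isPrefixOf]
                intro h'; exact absurd h'.symm hc]
            rw [ih rest (c :: cur) acc (by simpa using Nat.lt_of_succ_lt_succ h)]
            simp [pvSegs, hc]

theorem pvSegs_ne_nil (l pre : List Char) : pvSegs pre l ≠ [] := by
  induction l generalizing pre with
  | nil => simp [pvSegs]
  | cons c rest ih => by_cases h : c = ' ' <;> simp [pvSegs, h, ih]

theorem join_pvSegs (l pre : List Char) :
    PySem.Chars.join [' ', ' ', ' '] (pvSegs pre l) = pre ++ l.flatMap pvTriple := by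
  induction l generalizing pre with
  | nil => simp [pvSegs, PySem.Chars.join, List.intercalate]
  | cons c rest ih =>
      by_cases h : c = ' '
      · subst h
        obtain ⟨y, zs, hy⟩ : ∃ y zs, pvSegs ([] : List Char) rest = y :: zs := by
          cases hseg : pvSegs ([] : List Char) rest with
          | nil => exact absurd hseg (pvSegs_ne_nil rest [])
          | cons y zs => exact ⟨y, zs, rfl⟩
        have ihr := ih ([] : List Char)
        rw [hy] at ihr
        have step : PySem.Chars.join [' ', ' ', ' '] (pre :: y :: zs)
            = pre ++ [' ', ' ', ' '] ++ PySem.Chars.join [' ', ' ', ' '] (y :: zs) := by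
          simp [PySem.Chars.join, List.intercalate, List.intersperse_cons₂]
        simp [pvSegs, hy, step, ihr, pvTriple, List.append_assoc]
      · simp [pvSegs, h, ih, pvTriple, List.append_assoc]

-- ===== VERDICT (by name: the statement is the Claim_ definition above) =====
theorem triplement_espace_spec : Claim_equal_triplement_espace := by
  intro phrase _
  unfold Spec_triplement_espace triplement_espace triplement_espace_alt
  rw [triplement_espace_go_eq, PySem.Chars.splitOn,
    splitOn_go_eq _ _ _ _ (Nat.lt_succ_self _)]
  simp only [List.reverse_nil, List.nil_append]
  rw [join_pvSegs]
  simp
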